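-- pv_equiv track=rewrite | github.com/positron96/Blender-osgjs-importer | scripts/starter.py | decode_delta
-- ===== SOURCE A (Python) =====
-- def decode_delta(t, e):
-- 	i = e|0
-- 	n = len(t)
-- 	if i>=len(t):
-- 		r = None
-- 	else:
-- 		r = t[i]
-- 	a = i + 1
-- 	while(a<n):
-- 		s = t[a]
-- 		r = t[a] = r + (s>>1^-(1&s))
-- 		a += 1
-- 	return t
-- ===== SOURCE B (Python) =====
-- def decode_delta(t, e):
--     i = e | 0
--     n = len(t)
--     # pass 1: zigzag-decode each delta in place
--     for a in range(i + 1, n):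
--         s = t[a]
--         t[a] = s >> 1 ^ -(1 & s)
--     # pass 2: prefix-accumulate, seeded by the untouched t[i]
--     for a in range(i + 1, n):
--         t[a] += t[a - 1]
--     return t
-- ===== Notes on version B (the rewrite author's own statement) =====
-- stated objective: alternative
-- what changed: The single fused while-loop carrying the running sum r is replaced by two separate index passes: first zigzag-decode every delta in place, then prefix-accumulate seeded by the untouched t[i].
-- outside the precondition, e.g. on decode_delta([1, 2, 3], -1): A returns [2, 3, 1], B returns [-3, -2, -4]
import Mathlib
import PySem

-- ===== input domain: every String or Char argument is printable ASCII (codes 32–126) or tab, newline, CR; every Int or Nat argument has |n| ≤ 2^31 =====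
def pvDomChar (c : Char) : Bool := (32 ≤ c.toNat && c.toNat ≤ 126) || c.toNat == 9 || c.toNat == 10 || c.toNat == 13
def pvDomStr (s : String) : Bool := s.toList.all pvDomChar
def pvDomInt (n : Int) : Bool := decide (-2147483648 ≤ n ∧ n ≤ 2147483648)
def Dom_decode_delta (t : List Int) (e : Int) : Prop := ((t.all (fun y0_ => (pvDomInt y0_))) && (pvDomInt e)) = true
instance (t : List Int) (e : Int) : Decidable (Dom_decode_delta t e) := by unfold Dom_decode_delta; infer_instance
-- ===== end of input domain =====

-- B replaces A's fused accumulate loop by two separate passes (zigzag-decode in place, then prefix-accumulate);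
-- same cost, different decomposition. Both Pythons mutate t in place; the equivalence proved is about the return value.

-- ===== PORT A =====
-- the while loop: state (t, r, a); fuel = number of remaining iterations n - a
def pvLoopA (t : List Int) (r : Int) (a : Int) : Nat → List Int
  | 0 => t
  | f + 1 =>
    let s := PySem.List.pyGetD t a 0
    let v := r + PySem.Int.bxor (s >>> 1) (-(PySem.Int.band 1 s))
    pvLoopA (PySem.List.pySetD t a v) v (a + 1) f

def decode_delta (t : List Int) (e : Int) : List Int :=
  let i := PySem.Int.bor e 0
  let n : Int := t.length
  if i ≥ n then t          -- r = None; the loop body never runs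
  else
    let r := PySem.List.pyGetD t i 0
    pvLoopA t r (i + 1) (n - (i + 1)).toNat

-- ===== PORT B =====
-- pass 1: for a in range(i+1, n): t[a] = t[a]>>1 ^ -(1&t[a])
def pvZig (t : List Int) (a : Int) : Nat → List Int
  | 0 => t
  | f + 1 =>
    let s := PySem.List.pyGetD t a 0
    pvZig (PySem.List.pySetD t a (PySem.Int.bxor (s >>> 1) (-(PySem.Int.band 1 s)))) (a + 1) f

-- pass 2: for a in range(i+1, n): t[a] += t[a-1]
def pvAcc (t : List Int) (a : Int) : Nat → List Int
  | 0 => t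
  | f + 1 =>
    pvAcc (PySem.List.pySetD t a (PySem.List.pyGetD t a 0 + PySem.List.pyGetD t (a - 1) 0)) (a + 1) f

def decode_delta_alt (t : List Int) (e : Int) : List Int :=
  let i := PySem.Int.bor e 0
  let n : Int := t.length
  pvAcc (pvZig t (i + 1) (n - (i + 1)).toNat) (i + 1) (n - (i + 1)).toNat

-- ===== PRECONDITION & SPEC =====
-- Pre_ restricts to the function's natural domain: a nonnegative base index e. For negative e A's
-- value (or IndexError) arises from Python negative-index wraparound reading cells the loop has
-- already overwritten — an accident of the fused in-place loop that B's two-pass scheme does not share.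
def Pre_decode_delta (t : List Int) (e : Int) : Prop := 0 ≤ e
instance (t : List Int) (e : Int) : Decidable (Pre_decode_delta t e) := by unfold Pre_decode_delta; infer_instance

def pvWitness_decode_delta : List Int × Int := ([4, 5, 1, 3], 1)

def Spec_decode_delta (t : List Int) (e : Int) (out : List Int) : Prop := out = decode_delta_alt t e
instance (t : List Int) (e : Int) (out : List Int) : Decidable (Spec_decode_delta t e out) := by unfold Spec_decode_delta; infer_instance

-- ===== CLAIM (what is proved, stated in full; the proofs are below) =====
def Claim_equal_decode_delta : Prop := ∀ (t : List Int) (e : Int), Dom_decode_delta t e → Pre_decode_delta t e → Spec_decode_delta t e (decode_delta t e)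

-- ===== LEMMAS AND PROOFS =====

theorem pv_getD_nonneg (xs : List Int) (a : Int) (h : 0 ≤ a) :
    PySem.List.pyGetD xs a 0 = xs.getD a.toNat 0 := by
  have h2 : a = ((a.toNat : Nat) : Int) := by omega
  rw [h2, PySem.List.pyGetD_natCast, Int.toNat_natCast]

-- reading/writing strictly below a set index is unaffected by it
theorem pv_getD_set_ne (t : List Int) (a b v : Int) (h0a : 0 ≤ a) (h0b : 0 ≤ b) (hne : a ≠ b) :
    PySem.List.pyGetD (PySem.List.pySetD t b v) a 0 = PySem.List.pyGetD t a 0 := by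
  rw [PySem.List.pySetD_of_nonneg _ _ h0b, pv_getD_nonneg _ _ h0a, pv_getD_nonneg _ _ h0a,
      List.getD, List.getD, List.getElem?_set_ne (by omega)]

-- pvZig writes only at indices ≥ a; a read strictly below a is unchanged
theorem pv_getD_zig (f : Nat) (t : List Int) (a b : Int) (hb : 0 ≤ b) (hba : b < a) :
    PySem.List.pyGetD (pvZig t a f) b 0 = PySem.List.pyGetD t b 0 := by
  induction f generalizing t a with
  | zero => rfl
  | succ f ih =>
    rw [pvZig, ih _ _ (by omega), pv_getD_set_ne _ _ _ _ hb (by omega) (by omega)]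

-- a write strictly below a commutes with pvZig
theorem pv_set_zig (f : Nat) (t : List Int) (a b : Int) (v : Int) (hb : 0 ≤ b) (hba : b < a) :
    PySem.List.pySetD (pvZig t a f) b v = pvZig (PySem.List.pySetD t b v) a f := by
  induction f generalizing t a with
  | zero => rfl
  | succ f ih =>
    rw [pvZig, pvZig, ih _ _ (by omega),
        pv_getD_set_ne _ _ _ _ (by omega) hb (by omega)]
    rw [PySem.List.pySetD_of_nonneg _ _ hb,
        PySem.List.pySetD_of_nonneg _ _ (by omega : (0:Int) ≤ a),
        PySem.List.pySetD_of_nonneg _ _ hb,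
        PySem.List.pySetD_of_nonneg _ _ (by omega : (0:Int) ≤ a),
        List.set_comm _ _ (show a.toNat ≠ b.toNat by omega)]

-- main invariant: A's fused loop = decode pass then accumulate pass, when r is the current t[a-1]
theorem pv_main (f : Nat) (t : List Int) (a r : Int) (ha : 1 ≤ a)
    (hlen : a + f ≤ t.length) (hr : r = PySem.List.pyGetD t (a - 1) 0) :
    pvLoopA t r a f = pvAcc (pvZig t a f) a f := by
  induction f generalizing t a r with
  | zero => rfl
  | succ f ih =>
    have ha0 : (0:Int) ≤ a := by omega
    have hain : a.toNat < t.length := by omega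
    set s := PySem.List.pyGetD t a 0 with hs
    set d := PySem.Int.bxor (s >>> 1) (-(PySem.Int.band 1 s)) with hd
    have hgd : PySem.List.pyGetD (PySem.List.pySetD t a d) a 0 = d := by
      rw [PySem.List.pySetD_of_nonneg _ _ ha0, pv_getD_nonneg _ _ ha0,
          List.getD, List.getElem?_set_self (by omega), Option.getD_some]
    have hgprev : PySem.List.pyGetD (PySem.List.pySetD t a d) (a - 1) 0
        = PySem.List.pyGetD t (a - 1) 0 :=
      pv_getD_set_ne _ _ _ _ (by omega) ha0 (by omega)
    rw [pvLoopA, pvZig, pvAcc]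
    rw [pv_getD_zig f _ _ a (by omega) (by omega),
        pv_getD_zig f _ _ (a - 1) (by omega) (by omega)]
    rw [hgd, hgprev, ← hr]
    rw [pv_set_zig f _ _ a _ ha0 (by omega)]
    rw [PySem.List.pySetD_of_nonneg _ _ ha0, PySem.List.pySetD_of_nonneg _ _ ha0,
        PySem.List.pySetD_of_nonneg _ _ ha0, List.set_set,
        show d + r = r + d from add_comm d r]
    refine ih (t.set a.toNat (r + d)) (a + 1) (r + d) (by omega) (by simp; omega) ?_
    rw [pv_getD_nonneg _ _ (by omega : (0:Int) ≤ a + 1 - 1),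
        show (a + 1 - 1).toNat = a.toNat from by omega,
        List.getD, List.getElem?_set_self (by omega), Option.getD_some]

theorem decode_delta_spec : Claim_equal_decode_delta := by
  intro t e _ hpre
  unfold Spec_decode_delta decode_delta decode_delta_alt
  simp only [PySem.Int.bor_zero]
  by_cases h : ((t.length : Int) ≤ e)
  · have hf : ((t.length : Int) - (e + 1)).toNat = 0 := by omega
    rw [if_pos (by exact h), hf]
    rfl
  · rw [if_neg (by omega)]
    have he : (0:Int) ≤ e := hpre
    have helt : e < (t.length : Int) := by omega
    exact pv_main _ t (e + 1) _ (by omega) (by omega) (by norm_num)
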